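-- pv_equiv track=rewrite | github.com/paiml/depyler | examples/hard_next_greater.py | count_elements_with_next_greater
-- ===== SOURCE A (Python) =====
-- def next_greater_element(arr: list[int]) -> list[int]:
--     """For each element, find next greater element to the right. -1 if none."""
--     length: int = len(arr)
--     result: list[int] = []
--     idx: int = 0
--     while idx < length:
--         result.append(-1)
--         idx = idx + 1
--     stack: list[int] = []
--     si: int = 0
--     while si < length:
--         stack_len: int = len(stack)
--         while stack_len > 0:
--             top_idx: int = stack_len - 1
--             top_val: int = stack[top_idx]
--             if arr[top_val] < arr[si]:
--                 result[top_val] = arr[si]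
--                 stack.pop()
--                 stack_len = len(stack)
--             else:
--                 stack_len = 0
--         stack.append(si)
--         si = si + 1
--     return result
--
-- def count_elements_with_next_greater(arr: list[int]) -> int:
--     """Count how many elements have a next greater element."""
--     nge: list[int] = next_greater_element(arr)
--     count: int = 0
--     idx: int = 0
--     length: int = len(nge)
--     while idx < length:
--         if nge[idx] != -1:
--             count = count + 1
--         idx = idx + 1
--     return count
-- ===== SOURCE B (Python) =====
-- def count_elements_with_next_greater(arr: list[int]) -> int:
--     """Count how many elements have a strictly greater element to their right."""
--     count = 0
--     max_right = None
--     for x in reversed(arr):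
--         if max_right is not None and max_right > x:
--             count += 1
--         if max_right is None or x > max_right:
--             max_right = x
--     return count
-- ===== Notes on version B (the rewrite author's own statement) =====
-- stated objective: simpler
-- what changed: Replaced the monotonic-stack next-greater-element table (with its in-band -1 sentinel) by a single right-to-left scan keeping the suffix maximum and counting elements it strictly exceeds.
-- intended difference: On arrays where some element x < -1 has its nearest strictly-greater right neighbour equal to -1, A returns a count that misses those elements (its -1 return value collides with its 'no next greater' sentinel, e.g. A([-2,-1]) = 0) while B counts them (B([-2,-1]) = 1), which is the intended count. — e.g. on count_elements_with_next_greater([-2, -1]): A returns 0, B returns 1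
import Mathlib
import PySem

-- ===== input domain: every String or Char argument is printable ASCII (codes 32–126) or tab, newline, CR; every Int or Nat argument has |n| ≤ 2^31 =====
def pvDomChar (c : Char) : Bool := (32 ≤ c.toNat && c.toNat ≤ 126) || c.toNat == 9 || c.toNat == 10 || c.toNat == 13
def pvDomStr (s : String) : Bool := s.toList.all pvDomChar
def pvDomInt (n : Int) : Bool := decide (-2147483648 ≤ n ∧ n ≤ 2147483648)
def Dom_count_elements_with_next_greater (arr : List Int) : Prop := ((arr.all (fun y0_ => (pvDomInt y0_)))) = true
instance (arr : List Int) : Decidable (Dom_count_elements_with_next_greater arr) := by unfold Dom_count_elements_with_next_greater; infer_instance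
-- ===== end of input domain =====

-- B replaces A's monotonic-stack next-greater table by a right-to-left suffix-maximum scan;
-- A's in-band -1 sentinel makes it miss elements whose next greater value is -1 (see D_ below).


-- ===== PORT A =====
-- first while loop of next_greater_element: result.append(-1) until idx = length
-- fuel = remaining trip count (length - idx).toNat, computed at the call site; makes the
-- while-loop a structural recursion without changing any step.
def initResultA (length : Int) : Nat → List Int → Int → List Int
  | 0, result, _ => result
  | (f+1), result, idx =>
      if idx < length then initResultA length f (result ++ [-1]) (idx + 1) else result

-- inner while loop: fuel is the Python variable stack_len; in every reachable call
-- stack_len = len(stack), so after stack.pop() Python's 'stack_len = len(stack)' is exactly n.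
def innerA (arr : List Int) (si : Int) : Nat → List Int → List Int → (List Int × List Int)
  | 0, result, stack => (result, stack)
  | (n+1), result, stack =>
      let top_val : Int := PySem.List.pyGetD stack (n : Int) 0
      if PySem.List.pyGetD arr top_val 0 < PySem.List.pyGetD arr si 0 then
        innerA arr si n (PySem.List.pySetD result top_val (PySem.List.pyGetD arr si 0)) stack.dropLast
      else (result, stack)

-- outer while loop over si
-- outer while loop over si; fuel = remaining trip count, as above
def mainA (arr : List Int) (length : Int) : Nat → List Int → List Int → Int → List Int
  | 0, result, _, _ => result
  | (f+1), result, stack, si =>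
      if si < length then
        let rs := innerA arr si stack.length result stack
        mainA arr length f rs.1 (rs.2 ++ [si]) (si + 1)
      else result

def next_greater_element (arr : List Int) : List Int :=
  let length : Int := (arr.length : Int)
  mainA arr length arr.length (initResultA length arr.length [] 0) [] 0

-- counting while loop of count_elements_with_next_greater
def countLoopA (nge : List Int) (length : Int) : Nat → Int → Int → Int
  | 0, count, _ => count
  | (f+1), count, idx =>
      if idx < length then
        countLoopA nge length f (if PySem.List.pyGetD nge idx 0 ≠ -1 then count + 1 else count) (idx + 1)
      else count

def count_elements_with_next_greater (arr : List Int) : Int :=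
  let nge := next_greater_element arr
  countLoopA nge (nge.length : Int) nge.length 0 0

-- ===== PORT B =====
-- state: (count, max_right); one pass over reversed(arr)
def stepB (s : Int × Option Int) (x : Int) : Int × Option Int :=
  ((match s.2 with
    | some m => if x < m then s.1 + 1 else s.1
    | none => s.1),
   (match s.2 with
    | some m => if m < x then some x else some m
    | none => some x))

def count_elements_with_next_greater_alt (arr : List Int) : Int :=
  (arr.reverse.foldl stepB (0, none)).1

-- ===== PRECONDITION & SPEC =====
-- A misses every element x < -1 whose nearest strictly greater element to the right is -1:
-- its result value -1 collides with its own 'no next greater' sentinel, so A does not count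
-- such elements, while B returns the intended count of elements with a strictly greater
-- element to their right.
def D_count_elements_with_next_greater (arr : List Int) : Prop :=
  ∃ j : Fin arr.length, arr.getD j 0 < -1 ∧
    (arr.drop (j + 1)).find? (fun y => decide (arr.getD j 0 < y)) = some (-1)
instance (arr : List Int) : Decidable (D_count_elements_with_next_greater arr) := by
  unfold D_count_elements_with_next_greater; infer_instance

def Spec_count_elements_with_next_greater (arr : List Int) (out : Int) : Prop :=
  ¬ D_count_elements_with_next_greater arr → out = count_elements_with_next_greater_alt arr
instance (arr : List Int) (out : Int) : Decidable (Spec_count_elements_with_next_greater arr out) := by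
  unfold Spec_count_elements_with_next_greater; infer_instance

def pvDiffWitness_count_elements_with_next_greater : List Int := [-2, -1]
def pvDiffWitnessOut_count_elements_with_next_greater : Int × Int := (0, 1)

-- ===== CLAIM (what is proved, stated in full; the proofs are below) =====
def Claim_unchanged_count_elements_with_next_greater : Prop := ∀ (arr : List Int), Dom_count_elements_with_next_greater arr → Spec_count_elements_with_next_greater arr (count_elements_with_next_greater arr)
def Claim_changed_count_elements_with_next_greater : Prop := Dom_count_elements_with_next_greater (pvDiffWitness_count_elements_with_next_greater) ∧ D_count_elements_with_next_greater (pvDiffWitness_count_elements_with_next_greater) ∧ count_elements_with_next_greater (pvDiffWitness_count_elements_with_next_greater) = pvDiffWitnessOut_count_elements_with_next_greater.1 ∧ count_elements_with_next_greater_alt (pvDiffWitness_count_elements_with_next_greater) = pvDiffWitnessOut_count_elements_with_next_greater.2 ∧ pvDiffWitnessOut_count_elements_with_next_greater.1 ≠ pvDiffWitnessOut_count_elements_with_next_greater.2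
def Claim_exact_count_elements_with_next_greater : Prop := ∀ (arr : List Int), Dom_count_elements_with_next_greater arr → D_count_elements_with_next_greater arr → count_elements_with_next_greater arr ≠ count_elements_with_next_greater_alt arr


-- ===== LEMMAS AND PROOFS =====

-- B's fold state, described structurally (proof helpers)
def maxO : List Int → Option Int
  | [] => none
  | x :: t => some (match maxO t with | none => x | some m => if m < x then x else m)

def cB : List Int → Int
  | [] => 0
  | x :: t => (match maxO t with | none => cB t | some m => if x < m then cB t + 1 else cB t)

-- ---- specification functions describing A's loop states ----

-- arr[j+1:k]
def sliceA (arr : List Int) (j k : Nat) : List Int := (arr.drop (j+1)).take (k - (j+1))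

-- 'y is strictly greater than arr[j]'
def pGt (arr : List Int) (j : Nat) : Int → Bool := fun y => decide (arr.getD j 0 < y)

-- value of A's result cell j after the outer loop has processed si = 0..k-1
def ngeS (arr : List Int) (j k : Nat) : Int := ((sliceA arr j k).find? (pGt arr j)).getD (-1)

-- 'no element of arr[j+1:k] is strictly greater than arr[j]' (j still unresolved at step k)
def unresS (arr : List Int) (j k : Nat) : Bool := (sliceA arr j k).all (fun y => decide (y ≤ arr.getD j 0))

-- A's result list after k outer steps
def resS (arr : List Int) (k : Nat) : List Int := (List.range arr.length).map (fun j => ngeS arr j k)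

-- A's stack after k outer steps: the unresolved indices, in increasing order
def stkS (arr : List Int) (k : Nat) : List Int :=
  ((List.range k).filter (fun j => unresS arr j k)).map (fun j => Int.ofNat j)

-- the inner loop's popping condition at outer step si
def popP (arr : List Int) (si : Int) : Int → Bool :=
  fun j => decide (PySem.List.pyGetD arr j 0 < PySem.List.pyGetD arr si 0)

-- ---- the three loops of A, characterised ----

lemma initResultA_char (len : Int) : ∀ (f : Nat) (res : List Int) (idx : Int), idx + f = len →
    initResultA len f res idx = res ++ List.replicate f (-1) := by
  intro f
  induction f with
  | zero => intro res idx h; simp [initResultA]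
  | succ n ih =>
    intro res idx h
    have hlt : idx < len := by omega
    simp only [initResultA, if_pos hlt]
    rw [ih (res ++ [-1]) (idx + 1) (by omega)]
    simp [List.replicate_succ]

lemma innerA_char (arr : List Int) (si : Int) : ∀ (T res : List Int),
    innerA arr si T.length res T.reverse =
      ((T.takeWhile (popP arr si)).foldl (fun r j => PySem.List.pySetD r j (PySem.List.pyGetD arr si 0)) res,
       (T.dropWhile (popP arr si)).reverse) := by
  intro T
  induction T with
  | nil => intro res; simp [innerA]
  | cons j t ih =>
    intro res
    have hrev : (j :: t).reverse = t.reverse ++ [j] := by simp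
    have hlen : (j :: t).length = t.length + 1 := rfl
    rw [hrev, hlen]
    have htop : PySem.List.pyGetD (t.reverse ++ [j]) ((t.length : Nat) : Int) 0 = j := by
      have : (t.reverse ++ [j]).getD t.length 0 = j := by simp [List.getD]
      simp only [PySem.List.pyGetD_natCast]
      exact this
    by_cases hc : popP arr si j = true
    · have hc' : (PySem.List.pyGetD arr j 0 < PySem.List.pyGetD arr si 0) := by
        simpa [popP] using hc
      simp only [innerA, htop, if_pos hc']
      rw [List.dropLast_concat, ih]
      simp [hc]
    · have hc' : ¬ (PySem.List.pyGetD arr j 0 < PySem.List.pyGetD arr si 0) := by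
        simpa [popP] using hc
      simp only [innerA, htop, if_neg hc']
      simp [hc]

lemma countLoopA_char (l : List Int) : ∀ (f : Nat) (c : Int) (i : Nat), i + f = l.length →
    countLoopA l (l.length : Int) f c (i : Int) = c + ((l.drop i).countP (fun v => decide (v ≠ -1)) : Nat) := by
  intro f
  induction f with
  | zero =>
    intro c i h
    have hd : l.drop i = [] := List.drop_eq_nil_of_le (by omega)
    simp [countLoopA, hd]
  | succ n ih =>
    intro c i h
    have hi : i < l.length := by omega
    have hlt : ((i:Int) < (l.length : Int)) := by exact_mod_cast hi
    have hget : PySem.List.pyGetD l ((i:Nat) : Int) 0 = l[i] := by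
      simp [PySem.List.pyGetD_natCast, List.getD, List.getElem?_eq_getElem hi]
    simp only [countLoopA, if_pos hlt]
    have hstep : ((i:Int) + 1) = (((i+1 : Nat)) : Int) := by push_cast; ring
    rw [hstep, ih _ (i+1) (by omega)]
    rw [List.drop_eq_getElem_cons hi, List.countP_cons]
    by_cases hv : l[i] ≠ (-1 : Int)
    · simp [hget, hv]
      ring
    · simp at hv; simp [hget, hv]

-- ---- general helpers ----

lemma takeWhile_dropWhile_filter {α : Type} (p : α → Bool) :
    ∀ (l : List α), l.Pairwise (fun a b => p b = true → p a = true) →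
      l.takeWhile p = l.filter p ∧ l.dropWhile p = l.filter (fun x => !p x) := by
  intro l
  induction l with
  | nil => intro _; simp
  | cons x t ih =>
    intro h
    rcases List.pairwise_cons.mp h with ⟨hx, ht⟩
    rcases ih ht with ⟨h1, h2⟩
    by_cases hp : p x = true
    · simp [List.takeWhile, List.dropWhile, List.filter, hp, h1, h2]
    · have hnone : ∀ y ∈ t, ¬ p y = true := fun y hy hc => hp (hx y hy hc)
      have hfn : t.filter p = [] := List.filter_eq_nil_iff.mpr hnone
      have hfs : t.filter (fun x => !p x) = t :=
        List.filter_eq_self.mpr (by intro y hy; simp [hnone y hy])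
      have hp' : p x = false := by simpa [Bool.not_eq_true] using hp
      exact ⟨by simp [List.takeWhile, List.filter, hp', hfn],
             by simp [List.dropWhile, List.filter, hp', hfs]⟩

lemma countP_lt {α : Type} (p q : α → Bool) :
    ∀ (l : List α), (∀ x ∈ l, p x = true → q x = true) →
      ∀ a ∈ l, q a = true → p a = false → l.countP p < l.countP q := by
  intro l
  induction l with
  | nil => intro _ a ha; simp at ha
  | cons x t ih =>
    intro himp a ha hqa hpa
    rcases List.mem_cons.mp ha with rfl | hat
    · have hle : t.countP p ≤ t.countP q :=
        List.countP_mono_left (fun y hy => himp y (List.mem_cons_of_mem _ hy))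
      rw [List.countP_cons, List.countP_cons, hpa, hqa]
      simp
      omega
    · have hlt := ih (fun y hy => himp y (List.mem_cons_of_mem _ hy)) a hat hqa hpa
      have hx : (if p x then 1 else 0) ≤ (if q x then 1 else 0) := by
        by_cases hpx : p x = true
        · simp [hpx, himp x (List.mem_cons_self) hpx]
        · have : p x = false := by simpa using hpx
          simp [this]
      simp only [List.countP_cons]
      omega

-- ---- slice facts ----

lemma sliceA_stop (arr : List Int) (j k : Nat) (h : k ≤ j + 1) : sliceA arr j k = [] := by
  simp [sliceA, Nat.sub_eq_zero_of_le h]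

lemma sliceA_full (arr : List Int) (j : Nat) : sliceA arr j arr.length = arr.drop (j+1) := by
  have : arr.length - (j+1) = (arr.drop (j+1)).length := by simp
  rw [sliceA, this, List.take_length]

lemma sliceA_succ (arr : List Int) (j k : Nat) (hj : j < k) (hk : k < arr.length) :
    sliceA arr j (k+1) = sliceA arr j k ++ [arr.getD k 0] := by
  have h1 : k + 1 - (j+1) = (k - (j+1)) + 1 := by omega
  have h2 : (arr.drop (j+1))[k - (j+1)]? = some (arr.getD k 0) := by
    rw [List.getElem?_drop]
    have : (j+1) + (k - (j+1)) = k := by omega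
    rw [this, List.getElem?_eq_getElem hk, List.getD_eq_getElem arr 0 hk]
  simp [sliceA, h1, List.take_add_one, h2]

lemma mem_sliceA (arr : List Int) (i j k : Nat) (h1 : i < j) (h2 : j < k) (h3 : j < arr.length) :
    arr.getD j 0 ∈ sliceA arr i k := by
  have hx : (sliceA arr i k)[j - (i+1)]? = some (arr.getD j 0) := by
    simp only [sliceA, List.getElem?_take, List.getElem?_drop]
    have hlt : j - (i+1) < k - (i+1) := by omega
    have : (i+1) + (j - (i+1)) = j := by omega
    simp [hlt, this, List.getElem?_eq_getElem h3]
  exact List.mem_of_getElem? hx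

lemma unres_le (arr : List Int) (i j k : Nat) (h : unresS arr i k = true)
    (h1 : i < j) (h2 : j < k) (h3 : j < arr.length) : arr.getD j 0 ≤ arr.getD i 0 := by
  have := (List.all_eq_true.mp h) _ (mem_sliceA arr i j k h1 h2 h3)
  simpa using this

-- ---- step facts ----

lemma unresS_succ (arr : List Int) (j k : Nat) (hj : j < k) (hk : k < arr.length) :
    unresS arr j (k+1) = (unresS arr j k && decide (arr.getD k 0 ≤ arr.getD j 0)) := by
  simp [unresS, sliceA_succ arr j k hj hk, List.all_append]

lemma ngeS_succ (arr : List Int) (j k : Nat) (hk : k < arr.length) :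
    ngeS arr j (k+1) =
      if j < k ∧ unresS arr j k = true ∧ arr.getD j 0 < arr.getD k 0
      then arr.getD k 0 else ngeS arr j k := by
  by_cases hj : j < k
  · rw [ngeS, sliceA_succ arr j k hj hk, List.find?_append]
    by_cases hu : unresS arr j k = true
    · have hnone : (sliceA arr j k).find? (pGt arr j) = none := by
        apply List.find?_eq_none.mpr
        intro y hy
        have := (List.all_eq_true.mp hu) _ hy
        simp [pGt]; simp at this; omega
      by_cases hlt : arr.getD j 0 < arr.getD k 0
      · simp only [hnone, Option.none_or, ngeS]
        rw [List.find?_cons_of_pos (by simp only [pGt, decide_eq_true_eq]; exact hlt), if_pos ⟨hj, hu, hlt⟩]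
        rfl
      · simp only [hnone, Option.none_or, ngeS]
        rw [List.find?_cons_of_neg (by simp only [pGt, decide_eq_true_eq]; exact hlt), if_neg (by tauto)]
        rfl
    · have hsome : ((sliceA arr j k).find? (pGt arr j)).isSome := by
        rw [List.find?_isSome]
        simp only [unresS, List.all_eq_true, not_forall] at hu
        rcases hu with ⟨y, hy, hp⟩
        exact ⟨y, hy, by simp [pGt]; simp at hp; omega⟩
      rcases Option.isSome_iff_exists.mp hsome with ⟨w, hw⟩
      simp [ngeS, hw, hu]
  · rw [ngeS, ngeS, sliceA_stop arr j (k+1) (by omega), sliceA_stop arr j k (by omega)]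
    simp [hj]

-- ---- the result update of one outer step ----

lemma foldl_pySetD_length (v : Int) : ∀ (L : List Int) (r : List Int),
    (L.foldl (fun r j => PySem.List.pySetD r j v) r).length = r.length := by
  intro L
  induction L with
  | nil => intro r; rfl
  | cons j t ih => intro r; rw [List.foldl_cons, ih]; simp [PySem.List.length_pySetD]

lemma foldl_pySetD_getD (v : Int) : ∀ (L : List Int) (r : List Int) (m : Nat),
    (∀ j ∈ L, ∃ jn : Nat, j = (jn : Int) ∧ jn < r.length) →
    (L.foldl (fun r j => PySem.List.pySetD r j v) r).getD m 0 =
      if (m : Int) ∈ L then v else r.getD m 0 := by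
  intro L
  induction L with
  | nil => intro r m _; simp
  | cons j t ih =>
    intro r m hmem
    rcases hmem j (List.mem_cons_self) with ⟨jn, rfl, hjn⟩
    rw [List.foldl_cons, PySem.List.pySetD_natCast]
    rw [ih (r.set jn v) m (by
      intro x hx
      rcases hmem x (List.mem_cons_of_mem _ hx) with ⟨xn, rfl, hxn⟩
      exact ⟨xn, rfl, by simpa using hxn⟩)]
    by_cases hmt : (m : Int) ∈ t
    · simp [hmt]
    · by_cases hmj : m = jn
      · subst hmj
        simp [hmt, List.getD, hjn]
      · have hne : ((m : Int) ∈ (jn : Int) :: t) ↔ False := by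
          simp [hmt]
          omega
        have hset : (r.set jn v).getD m 0 = r.getD m 0 := by
          simp [List.getD, Ne.symm hmj]
        simp only [hne, hmt, if_false]
        simpa using hset

lemma resS_getD (arr : List Int) (k m : Nat) (hm : m < arr.length) :
    (resS arr k).getD m 0 = ngeS arr m k := by
  simp [resS, List.getD, hm]

-- membership in the popped part of the stack
lemma mem_popped (arr : List Int) (k : Nat) (_hk : k < arr.length) (m : Nat) :
    ((m : Int) ∈ ((stkS arr k).reverse.filter (popP arr (k : Int)))) ↔
      (m < k ∧ unresS arr m k = true ∧ arr.getD m 0 < arr.getD k 0) := by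
  rw [stkS, List.mem_filter, List.mem_reverse, List.mem_map]
  constructor
  · rintro ⟨⟨jn, hjn, hcast⟩, h2⟩
    rcases List.mem_filter.mp hjn with ⟨hr, hu⟩
    have hj : jn = m := by
      have h2c : (jn : Int) = (m : Int) := hcast
      exact_mod_cast h2c
    subst hj
    refine ⟨List.mem_range.mp hr, hu, ?_⟩
    simp only [popP, PySem.List.pyGetD_natCast] at h2
    exact of_decide_eq_true h2
  · rintro ⟨h1, h2, h3⟩
    refine ⟨⟨m, List.mem_filter.mpr ⟨List.mem_range.mpr h1, h2⟩, rfl⟩, ?_⟩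
    simp only [popP, PySem.List.pyGetD_natCast]
    exact decide_eq_true h3

lemma result_step (arr : List Int) (k : Nat) (hk : k < arr.length) :
    ((stkS arr k).reverse.filter (popP arr (k : Int))).foldl
        (fun r j => PySem.List.pySetD r j (PySem.List.pyGetD arr (k : Int) 0)) (resS arr k) =
      resS arr (k+1) := by
  have hv : PySem.List.pyGetD arr ((k : Nat) : Int) 0 = arr.getD k 0 := by
    simp [PySem.List.pyGetD_natCast]
  have hlenres : (resS arr k).length = arr.length := by simp [resS]
  have hmemhyp : ∀ j ∈ ((stkS arr k).reverse.filter (popP arr (k : Int))),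
      ∃ jn : Nat, j = (jn : Int) ∧ jn < (resS arr k).length := by
    intro j hj
    rcases List.mem_filter.mp hj with ⟨h1, _⟩
    rw [List.mem_reverse, stkS, List.mem_map] at h1
    rcases h1 with ⟨jn, hjn, hcast⟩
    rcases List.mem_filter.mp hjn with ⟨hr, _⟩
    exact ⟨jn, hcast.symm, by rw [hlenres]; exact lt_of_lt_of_le (List.mem_range.mp hr) (le_of_lt hk)⟩
  apply List.ext_getElem
  · rw [foldl_pySetD_length]; simp [resS]
  · intro m hm1 hm2
    have hmlen : m < arr.length := by
      have := hm2; simpa [resS] using this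
    have e1 : ∀ (l : List Int) (h : m < l.length), l[m] = l.getD m 0 :=
      fun l h => (List.getD_eq_getElem l 0 h).symm
    rw [e1 _ hm1, e1 _ hm2]
    rw [foldl_pySetD_getD _ _ _ _ hmemhyp, resS_getD arr (k+1) m hmlen, resS_getD arr k m hmlen,
        ngeS_succ arr m k hk]
    by_cases hin : (m : Int) ∈ ((stkS arr k).reverse.filter (popP arr (k : Int)))
    · rw [if_pos hin, if_pos ((mem_popped arr k hk m).mp hin), hv]
    · rw [if_neg hin, if_neg (fun hc => hin ((mem_popped arr k hk m).mpr hc))]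

-- ---- the stack update of one outer step ----

lemma stack_step (arr : List Int) (k : Nat) (hk : k < arr.length) :
    (stkS arr k).filter (fun j => !(popP arr (k : Int) j)) ++ [(k : Int)] = stkS arr (k+1) := by
  rw [stkS, stkS, List.range_succ, List.filter_append, List.map_append]
  have hself : unresS arr k (k+1) = true := by
    simp [unresS, sliceA_stop arr k (k+1) (by omega)]
  rw [List.filter_map]
  congr 1
  · congr 1
    rw [List.filter_filter]
    apply List.filter_congr
    intro j hj
    have hjk : j < k := List.mem_range.mp hj
    rw [unresS_succ arr j k hjk hk]
    simp only [Function.comp, popP, Int.ofNat_eq_natCast, PySem.List.pyGetD_natCast]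
    rw [Bool.and_comm]
    congr 1
    rw [← decide_not]
    exact decide_eq_decide.mpr (by constructor <;> intro <;> omega)
  · simp [hself]

-- ---- the main loop ----

lemma mainA_char (arr : List Int) : ∀ (f k : Nat), k + f = arr.length →
    mainA arr (arr.length : Int) f (resS arr k) (stkS arr k) (k : Int) = resS arr arr.length := by
  intro f
  induction f with
  | zero =>
    intro k h
    have : k = arr.length := by omega
    subst this
    rfl
  | succ n ih =>
    intro k h
    have hk : k < arr.length := by omega
    have hlt : ((k : Int) < (arr.length : Int)) := by exact_mod_cast hk
    simp only [mainA, if_pos hlt]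
    -- characterize the inner loop
    have hinner := innerA_char arr (k : Int) ((stkS arr k).reverse) (resS arr k)
    rw [List.length_reverse, List.reverse_reverse] at hinner
    rw [hinner]
    -- takeWhile/dropWhile become filters (the stack's values are monotone)
    have hpw : ((stkS arr k).reverse).Pairwise
        (fun a b => popP arr (k : Int) b = true → popP arr (k : Int) a = true) := by
      rw [List.pairwise_reverse]
      rw [stkS, List.pairwise_map]
      have hbase : ((List.range k).filter (fun j => unresS arr j k)).Pairwise (· < ·) :=
        (List.pairwise_lt_range).filter _
      apply List.Pairwise.imp_of_mem ?_ hbase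
      intro a b ha hb hab
      rcases List.mem_filter.mp ha with ⟨har, hau⟩
      rcases List.mem_filter.mp hb with ⟨hbr, _⟩
      have hak : a < k := List.mem_range.mp har
      have hbk : b < k := List.mem_range.mp hbr
      intro hpa
      simp only [popP, Int.ofNat_eq_natCast, PySem.List.pyGetD_natCast] at hpa ⊢
      have h1 : arr.getD b 0 ≤ arr.getD a 0 :=
        unres_le arr a b k hau hab hbk (lt_trans hbk hk)
      have h2 : arr.getD a 0 < arr.getD k 0 := by simpa using hpa
      exact decide_eq_true (lt_of_le_of_lt h1 h2)
    rcases takeWhile_dropWhile_filter (popP arr (k : Int)) _ hpw with ⟨htw, hdw⟩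
    rw [htw, hdw]
    -- new result and new stack
    rw [result_step arr k hk]
    rw [List.filter_reverse, List.reverse_reverse]
    rw [stack_step arr k hk]
    have hcast : ((k : Int) + 1) = (((k+1 : Nat)) : Int) := by push_cast; ring
    rw [hcast]
    exact ih (k+1) (by omega)

lemma nge_eq (arr : List Int) : next_greater_element arr = resS arr arr.length := by
  rw [next_greater_element]
  have hinit : initResultA (arr.length : Int) arr.length [] 0 = List.replicate arr.length (-1) := by
    rw [initResultA_char (arr.length : Int) arr.length [] 0 (by omega)]
    simp
  have hres0 : List.replicate arr.length (-1 : Int) = resS arr 0 := by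
    rw [resS]
    have : ∀ j ∈ List.range arr.length, ngeS arr j 0 = -1 := by
      intro j _
      rw [ngeS, sliceA_stop arr j 0 (by omega)]
      rfl
    rw [List.map_congr_left this]
    simp [List.map_const']
  have hstk0 : ([] : List Int) = stkS arr 0 := by simp [stkS]
  rw [hinit, hres0, hstk0]
  exact mainA_char arr arr.length 0 (by omega)

lemma countA_char (arr : List Int) :
    count_elements_with_next_greater arr =
      (((List.range arr.length).countP (fun j => decide (ngeS arr j arr.length ≠ -1))) : Nat) := by
  rw [count_elements_with_next_greater, nge_eq]
  show countLoopA (resS arr arr.length) ((resS arr arr.length).length : Int)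
      (resS arr arr.length).length (((0:Nat) : Int)) (((0:Nat) : Int)) = _
  rw [countLoopA_char (resS arr arr.length) (resS arr arr.length).length (((0:Nat) : Int)) 0 (by omega)]
  simp only [List.drop_zero, resS, List.countP_map]
  simp
  rfl

-- ---- B's loop, characterised ----

lemma maxO_none_iff (t : List Int) : maxO t = none ↔ t = [] := by
  cases t <;> simp [maxO]

lemma maxO_spec : ∀ (t : List Int) (m : Int), maxO t = some m → m ∈ t ∧ ∀ y ∈ t, y ≤ m := by
  intro t
  induction t with
  | nil => intro m h; simp [maxO] at h
  | cons x t ih =>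
    intro m h
    cases ht : maxO t with
    | none =>
      have : t = [] := (maxO_none_iff t).mp ht
      subst this
      simp [maxO] at h
      subst h
      simp
    | some M =>
      rcases ih M ht with ⟨hmem, hub⟩
      simp only [maxO, ht, Option.some.injEq] at h
      by_cases hc : M < x
      · rw [if_pos hc] at h
        subst h
        refine ⟨List.mem_cons_self, ?_⟩
        intro y hy
        rcases List.mem_cons.mp hy with rfl | hyt
        · exact le_refl _
        · exact le_of_lt (lt_of_le_of_lt (hub y hyt) hc)
      · rw [if_neg hc] at h
        subst h
        refine ⟨List.mem_cons_of_mem _ hmem, ?_⟩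
        intro y hy
        rcases List.mem_cons.mp hy with rfl | hyt
        · omega
        · exact hub y hyt

lemma B_state : ∀ (l : List Int), l.reverse.foldl stepB ((0 : Int), (none : Option Int)) = (cB l, maxO l) := by
  intro l
  induction l with
  | nil => rfl
  | cons x t ih =>
    rw [List.reverse_cons, List.foldl_append, ih, List.foldl_cons, List.foldl_nil]
    cases ht : maxO t with
    | none => simp [stepB, cB, maxO, ht]
    | some m =>
      simp only [stepB, cB, maxO, ht]
      rw [Prod.mk.injEq]
      exact ⟨rfl, by split <;> rfl⟩

lemma cB_cons (x : Int) (t : List Int) :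
    cB (x :: t) = cB t + (if t.any (fun y => decide (x < y)) = true then 1 else 0) := by
  cases ht : maxO t with
  | none =>
    have : t = [] := (maxO_none_iff t).mp ht
    subst this
    simp [cB, maxO]
  | some m =>
    rcases maxO_spec t m ht with ⟨hmem, hub⟩
    have hiff : (x < m) ↔ (t.any (fun y => decide (x < y)) = true) := by
      constructor
      · intro h
        exact List.any_eq_true.mpr ⟨m, hmem, by simpa using h⟩
      · intro h
        rcases List.any_eq_true.mp h with ⟨y, hy, hxy⟩
        have := hub y hy
        simp at hxy
        omega
    simp only [cB, ht]
    by_cases hc : x < m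
    · rw [if_pos hc, if_pos (hiff.mp hc)]
    · rw [if_neg hc, if_neg (fun hh => hc (hiff.mpr hh))]
      ring

lemma cB_countP : ∀ (l : List Int), cB l =
    (((List.range l.length).countP
      (fun j => (l.drop (j+1)).any (fun y => decide (l.getD j 0 < y)))) : Nat) := by
  intro l
  induction l with
  | nil => rfl
  | cons x t ih =>
    rw [cB_cons, ih]
    have hlen : (x :: t).length = t.length + 1 := rfl
    rw [hlen, List.range_succ_eq_map, List.countP_cons, List.countP_map]
    have h0 : ((x :: t).drop (0+1)).any (fun y => decide ((x :: t).getD 0 0 < y)) =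
        t.any (fun y => decide (x < y)) := by simp
    have hcongr : (List.range t.length).countP
        ((fun j => ((x :: t).drop (j+1)).any (fun y => decide ((x :: t).getD j 0 < y))) ∘ Nat.succ) =
        (List.range t.length).countP (fun j => (t.drop (j+1)).any (fun y => decide (t.getD j 0 < y))) := by
      apply List.countP_congr
      intro j _
      simp [Function.comp]
    rw [hcongr, h0]
    push_cast
    by_cases hany : t.any (fun y => decide (x < y)) = true
    · simp [hany]
    · simp [hany]

lemma B_char (arr : List Int) :
    count_elements_with_next_greater_alt arr =
      (((List.range arr.length).countP
        (fun j => (arr.drop (j+1)).any (fun y => decide (arr.getD j 0 < y)))) : Nat) := by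
  have hB : count_elements_with_next_greater_alt arr = cB arr := by
    rw [count_elements_with_next_greater_alt, B_state]
  rw [hB, cB_countP]

-- ---- the bridge between A's predicate and B's, outside D_ ----

lemma pred_bridge (arr : List Int) (j : Nat) (hj : j < arr.length)
    (hnd : ¬ D_count_elements_with_next_greater arr) :
    decide (ngeS arr j arr.length ≠ -1) =
      (arr.drop (j+1)).any (fun y => decide (arr.getD j 0 < y)) := by
  rw [ngeS, sliceA_full]
  cases hf : (arr.drop (j+1)).find? (pGt arr j) with
  | none =>
    have hall := List.find?_eq_none.mp hf
    have hany : (arr.drop (j+1)).any (fun y => decide (arr.getD j 0 < y)) = false := by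
      rw [Bool.eq_false_iff]
      intro hc
      rcases List.any_eq_true.mp hc with ⟨y, hy, hp⟩
      exact hall y hy (by simpa [pGt] using hp)
    rw [hany]
    simp
  | some v =>
    have hp : pGt arr j v = true := List.find?_some hf
    have hmem : v ∈ arr.drop (j+1) := List.mem_of_find?_eq_some hf
    have hany : (arr.drop (j+1)).any (fun y => decide (arr.getD j 0 < y)) = true :=
      List.any_eq_true.mpr ⟨v, hmem, by simpa [pGt] using hp⟩
    have hvne : v ≠ -1 := by
      intro hv
      subst hv
      apply hnd
      refine ⟨⟨j, hj⟩, ?_, ?_⟩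
      · have hlt := of_decide_eq_true hp
        omega
      · simpa using hf
    rw [hany]
    simp [hvne]

-- ===== VERDICT (by name: the statement is the Claim_ definition above) =====
theorem count_elements_with_next_greater_spec : Claim_unchanged_count_elements_with_next_greater := by
  intro arr _ hnd
  rw [countA_char, B_char]
  have heq : (List.range arr.length).countP (fun j => decide (ngeS arr j arr.length ≠ -1)) =
      (List.range arr.length).countP
        (fun j => (arr.drop (j+1)).any (fun y => decide (arr.getD j 0 < y))) :=
    List.countP_congr (fun j hj => by rw [pred_bridge arr j (List.mem_range.mp hj) hnd])
  rw [heq]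

theorem count_elements_with_next_greater_changed : Claim_changed_count_elements_with_next_greater := by
  unfold Claim_changed_count_elements_with_next_greater; decide

theorem count_elements_with_next_greater_tight : Claim_exact_count_elements_with_next_greater := by
  intro arr _ hD
  rcases hD with ⟨⟨j, hj⟩, hlt, hfind⟩
  rw [countA_char, B_char]
  have hp1 : (fun m => decide (ngeS arr m arr.length ≠ -1)) j = false := by
    simp only [ngeS, sliceA_full]
    have : (arr.drop (j+1)).find? (pGt arr j) = some (-1) := by simpa [pGt] using hfind
    simp [this]
  have hp2 : (fun m => (arr.drop (m+1)).any (fun y => decide (arr.getD m 0 < y))) j = true := by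
    have hmem : (-1 : Int) ∈ arr.drop (j+1) := List.mem_of_find?_eq_some (by simpa [pGt] using hfind)
    exact List.any_eq_true.mpr ⟨-1, hmem, decide_eq_true hlt⟩
  have himp : ∀ m ∈ List.range arr.length,
      decide (ngeS arr m arr.length ≠ -1) = true →
      (arr.drop (m+1)).any (fun y => decide (arr.getD m 0 < y)) = true := by
    intro m _ hm
    rw [ngeS, sliceA_full] at hm
    cases hf : (arr.drop (m+1)).find? (pGt arr m) with
    | none => rw [hf] at hm; simp at hm
    | some v =>
      exact List.any_eq_true.mpr ⟨v, List.mem_of_find?_eq_some hf,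
        by simpa [pGt] using List.find?_some hf⟩
  have hlt2 : (List.range arr.length).countP (fun m => decide (ngeS arr m arr.length ≠ -1)) <
      (List.range arr.length).countP (fun m => (arr.drop (m+1)).any (fun y => decide (arr.getD m 0 < y))) :=
    countP_lt _ _ _ himp j (List.mem_range.mpr hj) hp2 hp1
  intro hc
  have : ((List.range arr.length).countP (fun m => decide (ngeS arr m arr.length ≠ -1)) : Int) =
      ((List.range arr.length).countP (fun m => (arr.drop (m+1)).any (fun y => decide (arr.getD m 0 < y))) : Int) := hc
  omega
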